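-- pv_equiv track=rewrite | github.com/superfm831010/cuscli | autocoder/sdk/async_runner/markdown_processor.py | _find_best_split_position
-- ===== SOURCE A (Python) =====
-- def _find_best_split_position(content: str, max_pos: int) -> int:
--     """找到最佳分割位置"""
--     if max_pos >= len(content):
--         return len(content)
--
--     # 优先在句号后分割
--     for i in range(max_pos - 1, max(0, max_pos - 100), -1):
--         if i < len(content) and content[i] == '.' and i + 1 < len(content) and content[i + 1] == ' ':
--             return i + 1
--
--     # 其次在换行符处分割
--     for i in range(max_pos - 1, max(0, max_pos - 100), -1):
--         if i < len(content) and content[i] == '\n':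
--             return i + 1
--
--     # 最后在空格处分割
--     for i in range(max_pos - 1, max(0, max_pos - 50), -1):
--         if i < len(content) and content[i] == ' ':
--             return i + 1
--
--     return max_pos
-- ===== SOURCE B (Python) =====
-- def _find_best_split_position(content: str, max_pos: int) -> int:
--     """Single backward scan keeping the best candidate for each separator kind."""
--     n = len(content)
--     if max_pos >= n:
--         return n
--     lo50 = max(0, max_pos - 50)
--     best_newline = None
--     best_space = None
--     for i in range(max_pos - 1, max(0, max_pos - 100), -1):
--         c = content[i]
--         if c == '.' and content[i + 1] == ' ':
--             return i + 1
--         if best_newline is None and c == '\n':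
--             best_newline = i
--         if best_space is None and c == ' ' and i > lo50:
--             best_space = i
--     if best_newline is not None:
--         return best_newline + 1
--     if best_space is not None:
--         return best_space + 1
--     return max_pos
-- ===== Notes on version B (the rewrite author's own statement) =====
-- stated objective: alternative
-- what changed: A makes three separate backward passes (period, newline, space) over the window; B makes one backward pass that returns immediately on '. ' and records the first newline and the first in-50-window space as candidates, choosing among them after the loop.
import Mathlib
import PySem

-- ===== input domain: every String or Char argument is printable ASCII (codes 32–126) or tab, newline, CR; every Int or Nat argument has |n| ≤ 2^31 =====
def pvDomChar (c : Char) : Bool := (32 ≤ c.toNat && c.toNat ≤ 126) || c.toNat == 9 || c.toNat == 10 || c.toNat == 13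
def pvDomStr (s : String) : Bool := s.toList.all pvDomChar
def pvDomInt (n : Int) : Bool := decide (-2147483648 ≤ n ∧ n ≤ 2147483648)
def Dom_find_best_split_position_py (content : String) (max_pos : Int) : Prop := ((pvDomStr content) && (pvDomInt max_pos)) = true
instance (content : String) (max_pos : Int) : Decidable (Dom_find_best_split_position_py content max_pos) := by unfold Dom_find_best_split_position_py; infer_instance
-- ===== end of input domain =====

-- B replaces A's three separate backward scans of the window by ONE backward scan that
-- returns at the first '. ' and keeps the first newline / first in-50-window space as candidates.


-- ===== PORT A =====
-- A: guard, then three separate backward scans (period+space, newline, space) over the window.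
def pvScanA (cs : List Char) (p : Int → Bool) : List Int → Option Int
  | [] => none
  | i :: rest => if p i then some i else pvScanA cs p rest

def find_best_split_position_py (content : String) (max_pos : Int) : Int :=
  let cs := content.toList
  let n : Int := cs.length
  if max_pos ≥ n then n
  else
    match pvScanA cs (fun i => decide (i < n) && (PySem.List.pyGet? cs i == some '.') &&
        decide (i + 1 < n) && (PySem.List.pyGet? cs (i + 1) == some ' '))
        (PySem.List.pyRange (max_pos - 1) (max 0 (max_pos - 100)) (-1)) with
    | some i => i + 1
    | none =>
      match pvScanA cs (fun i => decide (i < n) && (PySem.List.pyGet? cs i == some '\n'))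
          (PySem.List.pyRange (max_pos - 1) (max 0 (max_pos - 100)) (-1)) with
      | some i => i + 1
      | none =>
        match pvScanA cs (fun i => decide (i < n) && (PySem.List.pyGet? cs i == some ' '))
            (PySem.List.pyRange (max_pos - 1) (max 0 (max_pos - 50)) (-1)) with
        | some i => i + 1
        | none => max_pos

-- ===== PORT B =====
-- B: one backward scan; '. ' returns immediately, first newline / first in-50-window space are kept as candidates.
def pvLoopB (cs : List Char) (lo50 mp : Int) : List Int → Option Int → Option Int → Int
  | [], bn, bs =>
    match bn with
    | some j => j + 1
    | none => match bs with
      | some j => j + 1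
      | none => mp
  | i :: rest, bn, bs =>
    if (PySem.List.pyGet? cs i == some '.') && (PySem.List.pyGet? cs (i + 1) == some ' ') then i + 1
    else
      let bn' := if bn.isNone && (PySem.List.pyGet? cs i == some '\n') then some i else bn
      let bs' := if bs.isNone && (PySem.List.pyGet? cs i == some ' ') && decide (lo50 < i) then some i else bs
      pvLoopB cs lo50 mp rest bn' bs'

def find_best_split_position_py_alt (content : String) (max_pos : Int) : Int :=
  let cs := content.toList
  let n : Int := cs.length
  if max_pos ≥ n then n
  else pvLoopB cs (max 0 (max_pos - 50)) max_pos
    (PySem.List.pyRange (max_pos - 1) (max 0 (max_pos - 100)) (-1)) none none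

-- ===== PRECONDITION & SPEC =====
def Spec_find_best_split_position_py (content : String) (max_pos : Int) (out : Int) : Prop := out = find_best_split_position_py_alt content max_pos
instance (content : String) (max_pos : Int) (out : Int) : Decidable (Spec_find_best_split_position_py content max_pos out) := by unfold Spec_find_best_split_position_py; infer_instance

-- ===== CLAIM (what is proved, stated in full; the proofs are below) =====
def Claim_equal_find_best_split_position_py : Prop := ∀ (content : String) (max_pos : Int), Dom_find_best_split_position_py content max_pos → Spec_find_best_split_position_py content max_pos (find_best_split_position_py content max_pos)

-- ===== LEMMAS AND PROOFS =====

lemma pv_find?_congr {l : List Int} {p q : Int → Bool} (h : ∀ x ∈ l, p x = q x) :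
    l.find? p = l.find? q := by
  induction l with
  | nil => rfl
  | cons a t ih =>
    have ha := h a (by simp)
    simp only [List.find?_cons, ha]
    cases hq : q a
    · exact ih (fun x hx => h x (by simp [hx]))
    · rfl

lemma pvScanA_eq_find? (cs : List Char) (p : Int → Bool) (l : List Int) :
    pvScanA cs p l = l.find? p := by
  induction l with
  | nil => rfl
  | cons a t ih =>
    simp only [pvScanA, List.find?_cons]
    cases hp : p a <;> simp [ih]

lemma pvLoopB_eq (cs : List Char) (lo50 mp : Int) (l : List Int) (bn bs : Option Int) :
    pvLoopB cs lo50 mp l bn bs =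
      match l.find? (fun i => (PySem.List.pyGet? cs i == some '.') && (PySem.List.pyGet? cs (i + 1) == some ' ')) with
      | some i => i + 1
      | none =>
        match bn.or (l.find? (fun i => PySem.List.pyGet? cs i == some '\n')) with
        | some j => j + 1
        | none =>
          match bs.or (l.find? (fun i => (PySem.List.pyGet? cs i == some ' ') && decide (lo50 < i))) with
          | some j => j + 1
          | none => mp := by
  induction l generalizing bn bs with
  | nil => cases bn <;> cases bs <;> rfl
  | cons a t ih =>
    by_cases h1 : ((PySem.List.pyGet? cs a == some '.') && (PySem.List.pyGet? cs (a + 1) == some ' ')) = true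
    · simp [pvLoopB, h1]
    · rw [pvLoopB, if_neg (by simp [h1]), ih]
      simp only [List.find?_cons]
      simp only [Bool.not_eq_true] at h1
      rw [h1]
      cases hb2 : (PySem.List.pyGet? cs a == some '\n') <;>
      cases hb3 : ((PySem.List.pyGet? cs a == some ' ') && decide (lo50 < a)) <;>
      cases bn <;> cases bs <;>
        simp [hb3, Option.or]

-- ===== VERDICT (by name: the statement is the Claim_ definition above) =====
theorem find_best_split_position_py_spec : Claim_equal_find_best_split_position_py := by
  intro content max_pos _
  unfold Spec_find_best_split_position_py find_best_split_position_py find_best_split_position_py_alt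
  simp only []
  set cs := content.toList with hcs
  set n : Int := (cs.length : Int) with hn
  by_cases hg : max_pos ≥ n
  · simp [hg]
  · have hlt : max_pos < n := lt_of_not_ge hg
    simp only [if_neg hg]
    rw [pvLoopB_eq, pvScanA_eq_find?, pvScanA_eq_find?, pvScanA_eq_find?]
    have e1 : (PySem.List.pyRange (max_pos - 1) (max 0 (max_pos - 100)) (-1)).find?
          (fun i => decide (i < n) && (PySem.List.pyGet? cs i == some '.') && decide (i + 1 < n) && (PySem.List.pyGet? cs (i + 1) == some ' '))
        = (PySem.List.pyRange (max_pos - 1) (max 0 (max_pos - 100)) (-1)).find?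
          (fun i => (PySem.List.pyGet? cs i == some '.') && (PySem.List.pyGet? cs (i + 1) == some ' ')) := by
      apply pv_find?_congr
      intro x hx
      obtain ⟨hx1, hx2⟩ := PySem.List.mem_pyRange_neg_one.mp hx
      have hxn : x < n := by omega
      have hxn1 : x + 1 < n := by omega
      simp [hxn, hxn1]
    have e2 : (PySem.List.pyRange (max_pos - 1) (max 0 (max_pos - 100)) (-1)).find?
          (fun i => decide (i < n) && (PySem.List.pyGet? cs i == some '\n'))
        = (PySem.List.pyRange (max_pos - 1) (max 0 (max_pos - 100)) (-1)).find?
          (fun i => PySem.List.pyGet? cs i == some '\n') := by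
      apply pv_find?_congr
      intro x hx
      obtain ⟨hx1, hx2⟩ := PySem.List.mem_pyRange_neg_one.mp hx
      have hxn : x < n := by omega
      simp [hxn]
    have e3 : (PySem.List.pyRange (max_pos - 1) (max 0 (max_pos - 100)) (-1)).find?
          (fun i => (PySem.List.pyGet? cs i == some ' ') && decide (max 0 (max_pos - 50) < i))
        = (PySem.List.pyRange (max_pos - 1) (max 0 (max_pos - 50)) (-1)).find?
          (fun i => decide (i < n) && (PySem.List.pyGet? cs i == some ' ')) := by
      by_cases hp : max_pos ≤ 0
      · rw [PySem.List.pyRange_neg_one_eq_nil (by omega), PySem.List.pyRange_neg_one_eq_nil (by omega)]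
        rfl
      · have hsplit : PySem.List.pyRange (max_pos - 1) (max 0 (max_pos - 100)) (-1)
            = PySem.List.pyRange (max_pos - 1) (max 0 (max_pos - 50)) (-1)
              ++ (PySem.List.pyRange (max 0 (max_pos - 100) + 1) (max 0 (max_pos - 50) + 1) 1).reverse := by
          rw [PySem.List.pyRange_neg_one_eq_reverse, PySem.List.pyRange_neg_one_eq_reverse,
              PySem.List.pyRange_one_append (max 0 (max_pos - 100) + 1) (max 0 (max_pos - 50) + 1) (max_pos - 1 + 1) (by omega) (by omega),
              List.reverse_append]
        rw [hsplit, List.find?_append]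
        have hnone : ((PySem.List.pyRange (max 0 (max_pos - 100) + 1) (max 0 (max_pos - 50) + 1) 1).reverse).find?
            (fun i => (PySem.List.pyGet? cs i == some ' ') && decide (max 0 (max_pos - 50) < i)) = none := by
          apply List.find?_eq_none.mpr
          intro x hx
          simp only [List.mem_reverse] at hx
          obtain ⟨hx1, hx2⟩ := PySem.List.mem_pyRange_one.mp hx
          have hle : ¬ (max 0 (max_pos - 50) < x) := by omega
          simp [hle]
        rw [hnone, Option.or_none]
        apply pv_find?_congr
        intro x hx
        obtain ⟨hx1, hx2⟩ := PySem.List.mem_pyRange_neg_one.mp hx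
        have hxn : x < n := by omega
        simp [hxn, hx1]
    rw [e1, e2, e3]
    simp [Option.none_or]
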